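-- pv_equiv track=rewrite | github.com/daniel-reich/ubiquitous-fiesta | hv572GaPtbqwhJpTb_9.py | elasticize
-- ===== SOURCE A (Python) =====
-- def elasticize(word):
--   tempstrleft = ''
--   tempstrright = ''
--   for cnt in range((len(word)+1)//2):
--     tempstrleft += word[cnt] * (cnt + 1)
--   for cnt in range((len(word))//2):
--     tempstrright += word[-(cnt+1)] * (cnt + 1)
--   return tempstrleft + tempstrright[::-1]
-- ===== SOURCE B (Python) =====
-- def elasticize(word):
--   n = len(word)
--   return ''.join(c * min(i + 1, n - i) for i, c in enumerate(word))
-- ===== Notes on version B (the rewrite author's own statement) =====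
-- stated objective: simpler
-- what changed: Replaces A's two half-loops (left counter plus a right counter whose result is reversed) with one symmetric pass computing each character's repeat count directly as the closed form min(i+1, n-i).
import Mathlib
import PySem

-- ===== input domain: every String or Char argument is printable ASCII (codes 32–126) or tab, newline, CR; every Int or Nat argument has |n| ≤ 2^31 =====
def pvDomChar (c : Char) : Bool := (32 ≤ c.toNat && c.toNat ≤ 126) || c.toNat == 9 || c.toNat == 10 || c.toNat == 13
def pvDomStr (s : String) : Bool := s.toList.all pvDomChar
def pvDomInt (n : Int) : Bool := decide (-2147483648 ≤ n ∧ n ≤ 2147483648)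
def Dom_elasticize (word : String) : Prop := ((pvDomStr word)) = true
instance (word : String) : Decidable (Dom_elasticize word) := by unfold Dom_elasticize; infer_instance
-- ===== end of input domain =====

-- ===== PORT A =====
-- B replaces A's two half-loops (left counter, reversed right counter) with one symmetric pass using the closed-form count min(i+1, n-i); objective: simpler.
def elasticize (word : String) : String :=
  let w := word.toList
  let n : Int := w.length
  let left := (PySem.List.pyRange 0 (PySem.Int.floordiv (n + 1) 2) 1).foldl
      (fun acc cnt => acc ++ List.replicate (cnt + 1).toNat (PySem.List.pyGetD w cnt ' ')) []
  let right := (PySem.List.pyRange 0 (PySem.Int.floordiv n 2) 1).foldl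
      (fun acc cnt => acc ++ List.replicate (cnt + 1).toNat (PySem.List.pyGetD w (-(cnt + 1)) ' ')) []
  String.mk (left ++ right.reverse)

-- ===== PORT B =====
def elasticize_alt (word : String) : String :=
  let w := word.toList
  let n : Int := w.length
  String.mk ((PySem.List.enumerate w 0).flatMap
    (fun p => List.replicate (min (p.1 + 1) (n - p.1)).toNat p.2))

-- ===== PRECONDITION & SPEC =====
def Spec_elasticize (word : String) (out : String) : Prop := out = elasticize_alt word
instance (word : String) (out : String) : Decidable (Spec_elasticize word out) := by unfold Spec_elasticize; infer_instance

-- ===== CLAIM (what is proved, stated in full; the proofs are below) =====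
def Claim_equal_elasticize : Prop := ∀ (word : String), Dom_elasticize word → Spec_elasticize word (elasticize word)

-- ===== LEMMAS AND PROOFS =====

-- reversing a flatMap over a range reverses the index
theorem rev_flatMap_range {α : Type} (f : Nat → List α) :
    ∀ r : Nat, ((List.range r).flatMap f).reverse
      = (List.range r).flatMap (fun k => (f (r - 1 - k)).reverse) := by
  intro r
  induction r with
  | zero => simp
  | succ r ih =>
    conv_rhs => rw [List.range_succ_eq_map]
    rw [List.range_succ, List.flatMap_append, List.reverse_append, ih]
    simp only [List.flatMap_cons, List.flatMap_nil, List.append_nil, List.flatMap_map,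
      Nat.add_sub_cancel, Nat.sub_zero]
    congr 1
    apply List.flatMap_congr
    intro k _
    have : r - (k + 1) = r - 1 - k := by omega
    simp [this]

theorem flatMap_range_congr {α : Type} {f g : Nat → List α} (r : Nat)
    (h : ∀ k, k < r → f k = g k) :
    (List.range r).flatMap f = (List.range r).flatMap g :=
  List.flatMap_congr (fun k hk => h k (List.mem_range.mp hk))

theorem floordiv_two_nat (m : Nat) :
    PySem.Int.floordiv (m : Int) 2 = ((m / 2 : Nat) : Int) := by
  have h1 := (PySem.Int.le_floordiv_iff_mul_le
    (a := (m : Int)) (b := 2) (q := ((m / 2 : Nat) : Int)) (by norm_num)).mpr (by push_cast; omega)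
  have h2 := (PySem.Int.floordiv_lt_iff_lt_mul
    (a := (m : Int)) (b := 2) (q := ((m / 2 : Nat) : Int) + 1) (by norm_num)).mpr (by push_cast; omega)
  omega

-- A's left loop as a flatMap over a Nat range
theorem left_eq (w : List Char) :
    ((PySem.List.pyRange 0 (PySem.Int.floordiv ((w.length : Int) + 1) 2) 1).foldl
      (fun acc cnt => acc ++ List.replicate (cnt + 1).toNat (PySem.List.pyGetD w cnt ' ')) [])
    = (List.range ((w.length + 1) / 2)).flatMap
        (fun k => List.replicate (k + 1) (w.getD k ' ')) := by
  have h1 : ((w.length : Int) + 1) = ((w.length + 1 : Nat) : Int) := by push_cast; ring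
  rw [h1, floordiv_two_nat, PySem.List.foldl_append_eq_flatMap, PySem.List.pyRange_one,
    List.flatMap_map]
  simp only [Int.sub_zero, Int.toNat_natCast, List.nil_append]
  apply flatMap_range_congr
  intro k hk
  simp

-- A's right loop as a flatMap over a Nat range
theorem right_eq (w : List Char) :
    ((PySem.List.pyRange 0 (PySem.Int.floordiv (w.length : Int) 2) 1).foldl
      (fun acc cnt => acc ++ List.replicate (cnt + 1).toNat (PySem.List.pyGetD w (-(cnt + 1)) ' ')) [])
    = (List.range (w.length / 2)).flatMap
        (fun k => List.replicate (k + 1) (w.getD (w.length - (k + 1)) ' ')) := by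
  rw [floordiv_two_nat, PySem.List.foldl_append_eq_flatMap, PySem.List.pyRange_one,
    List.flatMap_map]
  simp only [Int.sub_zero, Int.toNat_natCast, List.nil_append]
  apply flatMap_range_congr
  intro k hk
  have hk' : k < w.length := by omega
  have h1 : ((0 : Int) + k + 1).toNat = k + 1 := by omega
  have h2 : (-((0 : Int) + k + 1)) = -(((k + 1 : Nat) : Int)) := by push_cast; ring
  rw [h1, h2, PySem.List.pyGetD_neg_natCast w (k + 1) ' ' (by omega) (by omega),
    List.getD_eq_getElem _ _ (by omega)]

-- B as a flatMap over the full Nat range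
theorem alt_eq (w : List Char) :
    ((PySem.List.enumerate w 0).flatMap
      (fun p => List.replicate (min (p.1 + 1) ((w.length : Int) - p.1)).toNat p.2))
    = (List.range w.length).flatMap
        (fun i => List.replicate (min (i + 1) (w.length - i)) (w.getD i ' ')) := by
  rw [PySem.List.enumerate_eq_map_pyRange w ' ', List.flatMap_map, PySem.List.pyRange_one,
    List.flatMap_map]
  simp only [PySem.List.len, Int.sub_zero, Int.toNat_natCast]
  apply flatMap_range_congr
  intro i hi
  have hmin : (min ((i : Int) + 1) ((w.length : Int) - i)).toNat
      = min (i + 1) (w.length - i) := by omega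
  simp [hmin]

-- the two halves of A concatenate to B's single symmetric pass
theorem key (w : List Char) :
    ((List.range ((w.length + 1) / 2)).flatMap
        (fun k => List.replicate (k + 1) (w.getD k ' ')))
    ++ ((List.range (w.length / 2)).flatMap
        (fun k => List.replicate (k + 1) (w.getD (w.length - (k + 1)) ' '))).reverse
    = (List.range w.length).flatMap
        (fun i => List.replicate (min (i + 1) (w.length - i)) (w.getD i ' ')) := by
  have hnlr : w.length = (w.length + 1) / 2 + w.length / 2 := by omega
  rw [rev_flatMap_range]
  conv_rhs => rw [hnlr, List.range_add, List.flatMap_append, List.flatMap_map]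
  congr 1
  · apply flatMap_range_congr
    intro k hk
    have h : min (k + 1) ((w.length + 1) / 2 + w.length / 2 - k) = k + 1 := by omega
    rw [h]
  · apply flatMap_range_congr
    intro k hk
    have e1 : w.length / 2 - 1 - k + 1 = w.length / 2 - k := by omega
    have e2 : w.length - (w.length / 2 - k) = (w.length + 1) / 2 + k := by omega
    have e3 : min ((w.length + 1) / 2 + k + 1)
        ((w.length + 1) / 2 + w.length / 2 - ((w.length + 1) / 2 + k)) = w.length / 2 - k := by
      omega
    rw [e1, e2, e3, List.reverse_replicate]

-- ===== VERDICT (by name: the statement is the Claim_ definition above) =====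
theorem elasticize_spec : Claim_equal_elasticize := by
  intro word _
  unfold Spec_elasticize elasticize elasticize_alt
  dsimp only
  rw [left_eq, right_eq, alt_eq, key]
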